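-- pv_equiv track=rewrite | github.com/rnucuta/EPS-Scraper | word_similarities.py | _find_dollar_prefixed_numbers
-- ===== SOURCE A (Python) =====
-- def _find_dollar_prefixed_numbers(tokenized_text):
--     """
--     Reconstruct and find all dollar-prefixed decimal numbers from tokenized text.
--     """
--     dollar_numbers = []
--     i = 0
--     while i < len(tokenized_text):
--         if tokenized_text[i] == '$':
--             number_parts = []
--             i += 1
--             # Collect digits, decimals, and commas as part of the number
--             while i < len(tokenized_text) and (tokenized_text[i].replace('.', '', 1).isdigit() or tokenized_text[i] in {'.', ','}):
--                 number_parts.append(tokenized_text[i])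
--                 i += 1
--             if number_parts:
--                 reconstructed_number = ''.join(number_parts).replace(',', '')
--
--                 # # Ensure decimal number
--                 if '.' in reconstructed_number:
--                     dollar_numbers.append((reconstructed_number, i - len(number_parts) - 1))  # Save the number and index
--         else:
--             i += 1
--     return dollar_numbers
-- ===== SOURCE B (Python) =====
-- def _find_dollar_prefixed_numbers(tokenized_text):
--     """
--     Two staged passes instead of one consuming scan: first collect every index
--     of a '$' token; then, for each such anchor independently, take the maximal
--     number-part prefix of the suffix after it and keep it if it is decimal.
--     Correct because the run after a '$' contains no '$' (a '$' is not a number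
--     part), so A's consuming scan visits exactly the same anchors.
--     """
--     def is_part(t):
--         return t.replace('.', '', 1).isdigit() or t in {'.', ','}
--
--     dollar_indices = [i for i, t in enumerate(tokenized_text) if t == '$']
--     result = []
--     for d in dollar_indices:
--         tail = tokenized_text[d + 1:]
--         k = next((j for j, t in enumerate(tail) if not is_part(t)), len(tail))
--         num = ''.join(tail[:k]).replace(',', '')
--         if '.' in num:
--             result.append((num, d))
--     return result
-- ===== Notes on version B (the rewrite author's own statement) =====
-- stated objective: alternative
-- what changed: Instead of A's single consuming scan with nested while loops and a shared index, B runs two staged passes: it first lists every index of a '$' token, then for each anchor independently recomputes the maximal number-part prefix of the suffix after it (correct because a '$' is never a number part, so runs never swallow an anchor).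
import Mathlib
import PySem

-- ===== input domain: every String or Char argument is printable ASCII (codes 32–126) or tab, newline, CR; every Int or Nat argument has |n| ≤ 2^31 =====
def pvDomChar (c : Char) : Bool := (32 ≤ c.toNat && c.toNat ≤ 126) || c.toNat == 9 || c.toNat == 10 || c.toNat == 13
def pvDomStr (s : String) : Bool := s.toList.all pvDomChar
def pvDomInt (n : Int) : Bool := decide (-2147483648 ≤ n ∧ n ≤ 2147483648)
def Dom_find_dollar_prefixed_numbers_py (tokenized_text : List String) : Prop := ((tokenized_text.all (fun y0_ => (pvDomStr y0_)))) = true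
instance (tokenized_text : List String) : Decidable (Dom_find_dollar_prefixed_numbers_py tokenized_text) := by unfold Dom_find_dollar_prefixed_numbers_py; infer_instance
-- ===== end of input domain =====

-- B replaces A's single consuming scan (nested while loops over a shared index) with two
-- staged passes: list every '$' index, then for each anchor independently recompute the
-- maximal number-part prefix of the suffix after it; objective: alternative (no speed claim).

-- ===== PORT A =====

-- tok.replace('.', '', 1): count-limited replace with old = '.', new = '' — exact hand port
-- (removes the first '.' only); PySem.Str.replace has no count argument.
def pvReplaceFirstDot (cs : List Char) : List Char :=
  match cs with
  | [] => []
  | c :: rest => if c == '.' then rest else c :: pvReplaceFirstDot rest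

-- tokenized_text[i].replace('.', '', 1).isdigit() or tokenized_text[i] in {'.', ','}
def pvIsNumberPart (t : String) : Bool :=
  PySem.Chars.strIsdigit (pvReplaceFirstDot t.toList) || t == "." || t == ","

-- the inner while loop of A: collect number parts from index i on, return (parts, final i);
-- fuel bounds the iterations (each one advances i), xs.length - i at the call site is enough
def pvCollect (xs : List String) (i : Nat) : Nat → List String × Nat
  | 0 => ([], i)
  | fuel + 1 =>
    if h : i < xs.length then
      if pvIsNumberPart (xs[i]'h) then
        let r := pvCollect xs (i + 1) fuel
        (xs[i]'h :: r.1, r.2)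
      else ([], i)
    else ([], i)

-- the outer while loop of A; fuel bounds the iterations (each one advances i by at least 1)
def pvOuter (xs : List String) (i : Nat) : Nat → List (String × Int)
  | 0 => []
  | fuel + 1 =>
    if h : i < xs.length then
      if (xs[i]'h) == "$" then
        let r := pvCollect xs (i + 1) (xs.length - (i + 1))
        (if r.1 ≠ [] then
           let num := PySem.Str.replace (PySem.Str.join "" r.1) "," ""
           if PySem.Str.isIn "." num then [(num, (r.2 : Int) - r.1.length - 1)] else []
         else []) ++ pvOuter xs r.2 fuel
      else pvOuter xs (i + 1) fuel
    else []

def find_dollar_prefixed_numbers_py (tokenized_text : List String) : List (String × Int) :=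
  pvOuter tokenized_text 0 tokenized_text.length

-- ===== PORT B =====

-- k = next((j for j, t in enumerate(tail) if not is_part(t)), len(tail))
def pvAnchorK (tail : List String) : Nat :=
  match tail.findIdx? (fun t => !pvIsNumberPart t) with
  | some j => j
  | none => tail.length

-- num = ''.join(tail[:k]).replace(',', ''); append (num, d) if '.' in num
def pvAnchorFromTail (tail : List String) (d : Int) : List (String × Int) :=
  pvEmitNum (PySem.Str.replace (PySem.Str.join "" (tail.take (pvAnchorK tail))) "," "") d
where
  pvEmitNum (num : String) (d : Int) : List (String × Int) :=
    if PySem.Str.isIn "." num then [(num, d)] else []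

-- body of B's per-anchor loop: tail = tokenized_text[d+1:], then the steps above
def pvAnchorNumber (xs : List String) (d : Int) : List (String × Int) :=
  pvAnchorFromTail (PySem.List.slice xs (some (d + 1)) none) d

-- dollar_indices = [i for i, t in enumerate(tokenized_text) if t == '$'], then the for loop
-- over it (each anchor appends at most one pair) as a flatMap
def find_dollar_prefixed_numbers_py_alt (tokenized_text : List String) : List (String × Int) :=
  (((PySem.List.enumerate tokenized_text 0).filter (fun p => p.2 == "$")).map (fun p => p.1)).flatMap
    (pvAnchorNumber tokenized_text)

-- ===== PRECONDITION & SPEC =====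
def Spec_find_dollar_prefixed_numbers_py (tokenized_text : List String) (out : List (String × Int)) : Prop := out = find_dollar_prefixed_numbers_py_alt tokenized_text
instance (tokenized_text : List String) (out : List (String × Int)) : Decidable (Spec_find_dollar_prefixed_numbers_py tokenized_text out) := by unfold Spec_find_dollar_prefixed_numbers_py; infer_instance

-- ===== CLAIM (what is proved, stated in full; the proofs are below) =====
def Claim_equal_find_dollar_prefixed_numbers_py : Prop := ∀ (tokenized_text : List String), Dom_find_dollar_prefixed_numbers_py tokenized_text → Spec_find_dollar_prefixed_numbers_py tokenized_text (find_dollar_prefixed_numbers_py tokenized_text)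

-- ===== LEMMAS AND PROOFS =====

-- a list is its is_part-prefix followed by the rest
theorem pv_takeWhile_append_drop {α : Type} (p : α → Bool) (l : List α) :
    l.takeWhile p ++ l.drop (l.takeWhile p).length = l := by
  induction l with
  | nil => simp
  | cons a l ih => by_cases h : p a <;> simp [h, ih]

-- the index computed by next(…, len(tail)) cuts the list exactly at its is_part-prefix
theorem take_pvAnchorK_eq_takeWhile (l : List String) :
    l.take (pvAnchorK l) = l.takeWhile pvIsNumberPart := by
  induction l with
  | nil => simp [pvAnchorK]
  | cons c rest ih =>
    by_cases hc : pvIsNumberPart c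
    · cases hE : rest.findIdx? (fun t => !pvIsNumberPart t) with
      | none =>
        simp only [pvAnchorK, List.findIdx?_cons, hE] at ih ⊢
        simp [hc, ← ih]
      | some j =>
        simp only [pvAnchorK, List.findIdx?_cons, hE] at ih ⊢
        simp [hc, ← ih]
    · simp [pvAnchorK, List.findIdx?_cons, hc]

-- A's inner while loop collects exactly the is_part-prefix of the rest of the list
theorem pvCollect_eq_takeWhile (xs : List String) (i fuel : Nat) (hf : xs.length - i ≤ fuel) :
    pvCollect xs i fuel =
      ((xs.drop i).takeWhile pvIsNumberPart,
       i + ((xs.drop i).takeWhile pvIsNumberPart).length) := by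
  induction fuel generalizing i with
  | zero =>
    have hd : xs.drop i = [] := List.drop_eq_nil_of_le (by omega)
    simp [hd, pvCollect]
  | succ f ih =>
    by_cases h : i < xs.length
    · have hd : xs.drop i = xs[i] :: xs.drop (i + 1) := (List.getElem_cons_drop h).symm
      by_cases hp : pvIsNumberPart xs[i]
      · simp only [pvCollect, dif_pos h, ih (i + 1) (by omega), hd,
          List.takeWhile_cons, hp]
        simp; omega
      · simp only [pvCollect, dif_pos h, if_neg hp]
        rw [hd]
        simp [hp]
    · have hd : xs.drop i = [] := List.drop_eq_nil_of_le (by omega)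
      simp [hd, pvCollect, h]

-- B's anchor body at a natural index i recomputes exactly A's emission for that '$'
theorem pvAnchorNumber_eq (xs : List String) (i : Nat) :
    pvAnchorNumber xs (i : Int) =
      (if (xs.drop (i + 1)).takeWhile pvIsNumberPart ≠ [] then
         if PySem.Str.isIn "." (PySem.Str.replace
              (PySem.Str.join "" ((xs.drop (i + 1)).takeWhile pvIsNumberPart)) "," "") then
           [(PySem.Str.replace
              (PySem.Str.join "" ((xs.drop (i + 1)).takeWhile pvIsNumberPart)) "," "", (i : Int))]
         else []
       else []) := by
  have hs : PySem.List.slice xs (some ((i : Int) + 1)) none = xs.drop (i + 1) := by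
    have h1 : ((i : Int) + 1) = ((i + 1 : Nat) : Int) := by push_cast; ring
    rw [h1, PySem.List.slice_from_natCast]
  unfold pvAnchorNumber pvAnchorFromTail pvAnchorFromTail.pvEmitNum
  rw [hs, take_pvAnchorK_eq_takeWhile]
  by_cases hps : (xs.drop (i + 1)).takeWhile pvIsNumberPart = []
  · rw [hps]
    simp only [ne_eq, not_true_eq_false, if_false]
    rw [if_neg (by decide)]
  · rw [if_pos hps]

-- "$" is not a number part, so the tokens a run consumes are never anchors
theorem mem_takeWhile_ne_dollar (l : List String) (x : String)
    (hx : x ∈ l.takeWhile pvIsNumberPart) : (x == "$") = false := by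
  have hp : pvIsNumberPart x = true := List.mem_takeWhile_imp hx
  by_contra h
  have hx' : x = "$" := by simpa using (by simpa using h : (x == "$") = true)
  rw [hx'] at hp
  exact absurd hp (by decide)

-- no '$' among a run's tokens: the filtered enumeration of the run is empty
theorem filter_enumerate_takeWhile (l : List String) (s : Int) :
    (PySem.List.enumerate (l.takeWhile pvIsNumberPart) s).filter (fun p => p.2 == "$") = [] := by
  rw [List.filter_eq_nil_iff]
  intro p hp
  rcases (PySem.List.mem_enumerate_iff _ _ _).1 hp with ⟨k, hk, rfl⟩
  simp only
  rw [mem_takeWhile_ne_dollar _ _ (List.getElem_mem hk)]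
  simp

-- main loop correspondence: A's outer loop from index i equals B's staged passes over the
-- anchors at indices ≥ i
theorem pvOuter_eq_alt (xs : List String) (i fuel : Nat) (hf : xs.length - i ≤ fuel) :
    pvOuter xs i fuel =
      (((PySem.List.enumerate (xs.drop i) (i : Int)).filter (fun p => p.2 == "$")).map
        (fun p => p.1)).flatMap (pvAnchorNumber xs) := by
  induction fuel generalizing i with
  | zero =>
    have hd : xs.drop i = [] := List.drop_eq_nil_of_le (by omega)
    simp [hd, pvOuter, PySem.List.enumerate_nil]
  | succ f ih =>
    by_cases h : i < xs.length
    · have hd : xs.drop i = xs[i] :: xs.drop (i + 1) := (List.getElem_cons_drop h).symm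
      by_cases hS : xs[i] = "$"
      · -- anchor case
        simp only [pvOuter, dif_pos h]
        rw [if_pos (show ((xs[i] == "$") = true) by simp [hS]),
          pvCollect_eq_takeWhile xs (i + 1) (xs.length - (i + 1)) (by omega)]
        set parts := (xs.drop (i + 1)).takeWhile pvIsNumberPart with hparts
        have hsplit : xs.drop (i + 1) = parts ++ xs.drop (i + 1 + parts.length) := by
          have h2 := pv_takeWhile_append_drop pvIsNumberPart (xs.drop (i + 1))
          rw [List.drop_drop] at h2
          rw [← hparts] at h2
          exact h2.symm
        rw [hd, PySem.List.enumerate_cons]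
        conv_rhs => rw [hsplit, PySem.List.enumerate_append]
        rw [List.filter_cons, if_pos (show ((((i : Int), xs[i]).2 == "$") = true) by simp [hS]),
          List.filter_append, filter_enumerate_takeWhile, List.nil_append, List.map_cons,
          List.flatMap_cons]
        have hidx : ((i : Int) + 1 + (parts.length : Int)) = ((i + 1 + parts.length : Nat) : Int) := by
          push_cast; ring
        rw [hidx, ← ih (i + 1 + parts.length) (by omega)]
        refine congrArg (· ++ pvOuter xs (i + 1 + parts.length) f) ?_
        rw [pvAnchorNumber_eq, ← hparts]
        by_cases hps : parts = []
        · simp [hps]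
        · rw [if_pos hps, if_pos hps]
          have hi2 : ((i + 1 + parts.length : Nat) : Int) - (parts.length : Int) - 1 = (i : Int) := by
            push_cast; ring
          rw [hi2]
      · -- non-anchor case
        simp only [pvOuter, dif_pos h]
        rw [if_neg (show ¬ ((xs[i] == "$") = true) by simp [hS]), hd, PySem.List.enumerate_cons,
          List.filter_cons, if_neg (show ¬ ((((i : Int), xs[i]).2 == "$") = true) by simp [hS])]
        have h1 : ((i : Int) + 1) = ((i + 1 : Nat) : Int) := by push_cast; ring
        rw [h1, ← ih (i + 1) (by omega)]
    · have hd : xs.drop i = [] := List.drop_eq_nil_of_le (by omega)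
      simp [hd, pvOuter, h, PySem.List.enumerate_nil]

-- ===== VERDICT (by name: the statement is the Claim_ definition above) =====
theorem find_dollar_prefixed_numbers_py_spec : Claim_equal_find_dollar_prefixed_numbers_py := by
  intro xs _
  unfold Spec_find_dollar_prefixed_numbers_py find_dollar_prefixed_numbers_py
    find_dollar_prefixed_numbers_py_alt
  simpa using pvOuter_eq_alt xs 0 xs.length (by omega)
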